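-- pv_equiv track=rewrite | github.com/vadim-schultz/ufc | sing-a-song/florian/song_fp.py | generate_song
-- ===== SOURCE A (Python) =====
-- def get_intro(animal) -> str:
--     return "\n".join([f"There was an old lady who swallowed a {animal[0]};", animal[1]])
--
-- def get_outro(animal):
--     return f"I don't know why she swallowed a {animal[0]} - perhaps she'll die!\n"
--
-- def get_ascendants(animals):
--     return (
--         ",\n".join(
--             [f"She swallowed the {animals[i-1][0]} to catch the {animals[i][0]}" for i in range(1, len(animals))]
--         )
--         + ";"
--     )
--
-- def generate_song(animals):
--
--     def generate_verse(i, animals):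
--         if i == 0:
--             return "\n".join([get_intro(animals[0]).replace(";", ".").strip("\n"), get_outro(animals[0])])
--         if i == len(animals) - 1:
--             return get_intro(animals[-1]).replace(";", "...") + "\n"
--
--         return "\n".join(
--             [
--                 get_intro(animals[i]),
--                 get_ascendants(list(reversed(animals[: i + 1]))),
--                 get_outro(animals[0]),
--             ]
--         )
--
--     return "\n" + "\n".join(generate_verse(i, animals) for i, animal in enumerate(animals)).strip("\n")
-- ===== SOURCE B (Python) =====
-- def generate_song(animals):
--     n = len(animals)
--     verses = []
--     chain = []  # running list of ascendant lines, newest first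
--     for i, (name, desc) in enumerate(animals):
--         if i > 0:
--             chain = [f"She swallowed the {name} to catch the {animals[i - 1][0]}"] + chain
--         intro = f"There was an old lady who swallowed a {name};\n{desc}"
--         outro = f"I don't know why she swallowed a {animals[0][0]} - perhaps she'll die!\n"
--         if i == 0:
--             verses.append(intro.replace(";", ".").strip("\n") + "\n" + outro)
--         elif i == n - 1:
--             verses.append(intro.replace(";", "...") + "\n")
--         else:
--             verses.append(intro + "\n" + ",\n".join(chain) + ";\n" + outro)
--     return "\n" + "\n".join(verses).strip("\n")
-- ===== Notes on version B (the rewrite author's own statement) =====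
-- stated objective: alternative
-- what changed: B replaces A's per-verse rebuild of the ascendant chain (reversing a growing slice and re-generating all its lines for every middle verse) with a single forward loop that keeps the chain as a running accumulator list, prepending one new line per animal.
import Mathlib
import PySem

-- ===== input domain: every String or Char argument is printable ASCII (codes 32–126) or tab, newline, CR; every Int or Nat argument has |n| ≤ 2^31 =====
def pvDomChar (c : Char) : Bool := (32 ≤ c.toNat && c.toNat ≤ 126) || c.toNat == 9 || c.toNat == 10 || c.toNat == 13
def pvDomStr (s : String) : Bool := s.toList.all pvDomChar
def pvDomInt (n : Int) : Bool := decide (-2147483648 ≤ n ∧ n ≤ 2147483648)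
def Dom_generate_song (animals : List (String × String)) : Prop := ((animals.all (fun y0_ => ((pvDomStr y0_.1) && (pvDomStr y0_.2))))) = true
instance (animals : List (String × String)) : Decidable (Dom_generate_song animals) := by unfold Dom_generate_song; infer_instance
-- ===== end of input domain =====

-- B replaces A's per-verse rebuild of the ascendant chain (reversing a growing slice and
-- re-generating all its lines for every middle verse) with one forward loop that keeps the
-- chain as a running accumulator, prepending one new line per animal; objective: alternative
-- (same cost overall — the song text itself is quadratic in the number of animals).


-- ===== PORT A =====
-- get_intro
def pvA_intro (a : List Char × List Char) : List Char :=
  PySem.Chars.join "\n".toList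
    ["There was an old lady who swallowed a ".toList ++ a.1 ++ ";".toList, a.2]

-- get_outro
def pvA_outro (a : List Char × List Char) : List Char :=
  "I don't know why she swallowed a ".toList ++ a.1 ++ " - perhaps she'll die!\n".toList

-- get_ascendants
def pvA_asc (animals : List (List Char × List Char)) : List Char :=
  PySem.Chars.join ",\n".toList
    ((PySem.List.pyRange 1 (PySem.List.len animals) 1).map (fun i =>
      "She swallowed the ".toList ++ (PySem.List.pyGetD animals (i - 1) ([], [])).1
        ++ " to catch the ".toList ++ (PySem.List.pyGetD animals i ([], [])).1))
  ++ ";".toList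

-- generate_verse (inner function of A)
def pvA_verse (i : Int) (animals : List (List Char × List Char)) : List Char :=
  if i = 0 then
    PySem.Chars.join "\n".toList
      [PySem.Chars.stripChars
         (PySem.Chars.replace (pvA_intro (PySem.List.pyGetD animals 0 ([], []))) ";".toList ".".toList)
         "\n".toList,
       pvA_outro (PySem.List.pyGetD animals 0 ([], []))]
  else if i = PySem.List.len animals - 1 then
    PySem.Chars.replace (pvA_intro (PySem.List.pyGetD animals (-1) ([], []))) ";".toList "...".toList
      ++ "\n".toList
  else
    PySem.Chars.join "\n".toList
      [pvA_intro (PySem.List.pyGetD animals i ([], [])),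
       pvA_asc ((PySem.List.slice animals none (some (i + 1))).reverse),
       pvA_outro (PySem.List.pyGetD animals 0 ([], []))]

def generate_song (animals : List (String × String)) : String :=
  let a := animals.map (fun p => (p.1.toList, p.2.toList))
  String.ofList ("\n".toList ++
    PySem.Chars.stripChars
      (PySem.Chars.join "\n".toList ((PySem.List.enumerate a 0).map (fun p => pvA_verse p.1 a)))
      "\n".toList)

-- ===== PORT B =====
def pvB_line (cur prev : List Char) : List Char :=
  "She swallowed the ".toList ++ cur ++ " to catch the ".toList ++ prev

-- one iteration of B's forward loop; state = (chain, verses)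
def pvB_step (a : List (List Char × List Char))
    (st : List (List Char) × List (List Char)) (p : Int × (List Char × List Char)) :
    List (List Char) × List (List Char) :=
  let i := p.1
  let name := p.2.1
  let desc := p.2.2
  let chain := if 0 < i then pvB_line name (PySem.List.pyGetD a (i - 1) ([], [])).1 :: st.1 else st.1
  let intro := "There was an old lady who swallowed a ".toList ++ name ++ ";".toList
                 ++ "\n".toList ++ desc
  let outro := "I don't know why she swallowed a ".toList ++ (PySem.List.pyGetD a 0 ([], [])).1
                 ++ " - perhaps she'll die!\n".toList
  let verse :=
    if i = 0 then
      PySem.Chars.stripChars (PySem.Chars.replace intro ";".toList ".".toList) "\n".toList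
        ++ "\n".toList ++ outro
    else if i = PySem.List.len a - 1 then
      PySem.Chars.replace intro ";".toList "...".toList ++ "\n".toList
    else
      intro ++ "\n".toList ++ PySem.Chars.join ",\n".toList chain ++ ";\n".toList ++ outro
  (chain, st.2 ++ [verse])

def generate_song_alt (animals : List (String × String)) : String :=
  let a := animals.map (fun p => (p.1.toList, p.2.toList))
  let st := (PySem.List.enumerate a 0).foldl (pvB_step a) ([], [])
  String.ofList ("\n".toList ++
    PySem.Chars.stripChars (PySem.Chars.join "\n".toList st.2) "\n".toList)

-- ===== PRECONDITION & SPEC =====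
def Spec_generate_song (animals : List (String × String)) (out : String) : Prop := out = generate_song_alt animals
instance (animals : List (String × String)) (out : String) : Decidable (Spec_generate_song animals out) := by unfold Spec_generate_song; infer_instance

-- ===== CLAIM (what is proved, stated in full; the proofs are below) =====
def Claim_equal_generate_song : Prop := ∀ (animals : List (String × String)), Dom_generate_song animals → Spec_generate_song animals (generate_song animals)

-- ===== LEMMAS AND PROOFS =====

-- B's chain after processing index i: one line per t < i, newest first.
def pvChain (a : List (List Char × List Char)) (i : Nat) : List (List Char) :=
  (List.range i).map (fun t => pvB_line (a.getD (i - t) ([], [])).1 (a.getD (i - t - 1) ([], [])).1)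

theorem pvChain_zero (a : List (List Char × List Char)) : pvChain a 0 = [] := rfl

theorem pvChain_succ (a : List (List Char × List Char)) (m : Nat) :
    pvChain a (m + 1) =
      pvB_line (a.getD (m + 1) ([], [])).1 (a.getD m ([], [])).1 :: pvChain a m := by
  unfold pvChain
  rw [List.range_succ_eq_map, List.map_cons, List.map_map]
  simp only [Nat.sub_zero, Nat.add_sub_cancel]
  congr 1
  apply List.map_congr_left
  intro t ht
  have e1 : m + 1 - (t + 1) = m - t := by omega
  have e2 : m + 1 - (t + 1) - 1 = m - t - 1 := by omega
  simp [Nat.succ_eq_add_one, e1]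

-- A's ascendant list over the reversed prefix IS B's accumulated chain.
theorem pvAsc_eq_chain (a : List (List Char × List Char)) (s : Nat) (hs : s < a.length) :
    pvA_asc ((PySem.List.slice a none (some ((s : Int) + 1))).reverse) =
      PySem.Chars.join ",\n".toList (pvChain a s) ++ ";".toList := by
  have hc : ((s : Int) + 1) = ((s + 1 : Nat) : Int) := by omega
  rw [pvA_asc, hc, PySem.List.slice_to_natCast]
  congr 2
  have hlen : ((a.take (s + 1)).reverse).length = s + 1 := by
    simp [List.length_take]; omega
  have hlenI : PySem.List.len ((a.take (s + 1)).reverse) = ((s + 1 : Nat) : Int) := by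
    simp [PySem.List.len_eq, hlen]
  rw [hlenI, PySem.List.pyRange_one]
  have : (((s + 1 : Nat) : Int) - 1).toNat = s := by omega
  rw [this]
  unfold pvChain
  rw [List.map_map]
  apply List.map_congr_left
  intro k hk
  simp only [Function.comp]
  have hk' : k < s := List.mem_range.mp hk
  have ht : (List.take (s + 1) a).length = s + 1 := by rw [List.length_take]; omega
  have h1 : ((1 : Int) + k - 1) = ((k : Nat) : Int) := by omega
  have h2 : ((1 : Int) + k) = ((k + 1 : Nat) : Int) := by omega
  rw [h1, h2, PySem.List.pyGetD_natCast, PySem.List.pyGetD_natCast]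
  have hkl : k < ((a.take (s + 1)).reverse).length := by omega
  have hkl1 : k + 1 < ((a.take (s + 1)).reverse).length := by omega
  rw [List.getD_eq_getElem _ _ hkl, List.getD_eq_getElem _ _ hkl1]
  have e1 : ((a.take (s + 1)).reverse)[k] = a[s - k]'(by omega) := by
    rw [List.getElem_reverse, List.getElem_take]
    congr 1; omega
  have e2 : ((a.take (s + 1)).reverse)[k + 1] = a[s - k - 1]'(by omega) := by
    rw [List.getElem_reverse, List.getElem_take]
    congr 1; omega
  rw [e1, e2, pvB_line]
  have g1 : a.getD (s - k) ([], []) = a[s - k]'(by omega) := List.getD_eq_getElem _ _ (by omega)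
  have g2 : a.getD (s - k - 1) ([], []) = a[s - k - 1]'(by omega) := List.getD_eq_getElem _ _ (by omega)
  rw [g1, g2]

-- one loop iteration of B produces exactly A's verse and advances the chain
theorem pvStep_eq (a : List (List Char × List Char)) (s : Nat) (hs : s < a.length)
    (vs : List (List Char)) :
    pvB_step a (pvChain a (s - 1), vs) ((s : Int), a[s]) =
      (pvChain a s, vs ++ [pvA_verse (s : Int) a]) := by
  have hne : a ≠ [] := by intro h; subst h; simp at hs
  have hget0 : PySem.List.pyGetD a 0 ([], []) = a[0]'(by omega) := by
    rw [show (0 : Int) = ((0 : Nat) : Int) from rfl, PySem.List.pyGetD_natCast,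
      List.getD_eq_getElem _ _ (show 0 < a.length by omega)]
  have hgets : PySem.List.pyGetD a (s : Int) ([], []) = a[s] := by
    rw [PySem.List.pyGetD_natCast, List.getD_eq_getElem _ _ hs]
  have hchain : (if 0 < (s : Int) then
      pvB_line (a[s]).1 (PySem.List.pyGetD a ((s : Int) - 1) ([], [])).1 :: pvChain a (s - 1)
      else pvChain a (s - 1)) = pvChain a s := by
    rcases Nat.eq_zero_or_pos s with h0 | hpos
    · subst h0; simp [pvChain_zero]
    · have hcast : ((s : Int) - 1) = ((s - 1 : Nat) : Int) := by omega
      rw [if_pos (by exact_mod_cast hpos), hcast, PySem.List.pyGetD_natCast,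
        List.getD_eq_getElem _ _ (show s - 1 < a.length by omega)]
      have hch := pvChain_succ a (s - 1)
      rw [show s - 1 + 1 = s from by omega] at hch
      rw [hch, List.getD_eq_getElem _ _ hs,
        List.getD_eq_getElem _ _ (show s - 1 < a.length by omega)]
  have hverse : (if (s : Int) = 0 then
      PySem.Chars.stripChars (PySem.Chars.replace
          ("There was an old lady who swallowed a ".toList ++ (a[s]).1 ++ ";".toList
            ++ "\n".toList ++ (a[s]).2) ";".toList ".".toList) "\n".toList
        ++ "\n".toList
        ++ ("I don't know why she swallowed a ".toList ++ (PySem.List.pyGetD a 0 ([], [])).1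
            ++ " - perhaps she'll die!\n".toList)
    else if (s : Int) = PySem.List.len a - 1 then
      PySem.Chars.replace
          ("There was an old lady who swallowed a ".toList ++ (a[s]).1 ++ ";".toList
            ++ "\n".toList ++ (a[s]).2) ";".toList "...".toList ++ "\n".toList
    else
      ("There was an old lady who swallowed a ".toList ++ (a[s]).1 ++ ";".toList
        ++ "\n".toList ++ (a[s]).2) ++ "\n".toList
        ++ PySem.Chars.join ",\n".toList (pvChain a s) ++ ";\n".toList
        ++ ("I don't know why she swallowed a ".toList ++ (PySem.List.pyGetD a 0 ([], [])).1
            ++ " - perhaps she'll die!\n".toList)) = pvA_verse (s : Int) a := by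
    by_cases h0 : (s : Int) = 0
    · rw [if_pos h0, pvA_verse, if_pos h0]
      have hs0 : s = 0 := by exact_mod_cast h0
      subst hs0
      rw [PySem.Chars.join_cons_cons, PySem.Chars.join_singleton, hget0, pvA_intro,
        PySem.Chars.join_cons_cons, PySem.Chars.join_singleton, pvA_outro]
    · rw [if_neg h0, pvA_verse, if_neg h0]
      by_cases hlast : (s : Int) = PySem.List.len a - 1
      · rw [if_pos hlast, if_pos hlast]
        have hsl : s = a.length - 1 := by
          simp only [PySem.List.len_eq] at hlast; omega
        have hlastget : PySem.List.pyGetD a (-1) ([], []) = a[s] := by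
          rw [PySem.List.pyGetD_neg_one a _ hne, List.getLast_eq_getElem]
          congr 1; omega
        rw [hlastget, pvA_intro, PySem.Chars.join_cons_cons, PySem.Chars.join_singleton]
      · rw [if_neg hlast, if_neg hlast, hgets,
          PySem.Chars.join_cons_cons, PySem.Chars.join_cons_cons, PySem.Chars.join_singleton,
          pvA_intro, PySem.Chars.join_cons_cons, PySem.Chars.join_singleton, pvA_outro,
          pvAsc_eq_chain a s hs]
        simp [List.append_assoc]
  simp only [pvB_step, hchain, hverse]

-- the whole loop: verses come out as A's verses, in order
theorem pvFold_eq (a : List (List Char × List Char)) :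
    ∀ (k s : Nat) (vs : List (List Char)), s + k = a.length →
      ((PySem.List.enumerate (a.drop s) (s : Int)).foldl (pvB_step a) (pvChain a (s - 1), vs)).2
        = vs ++ (List.range k).map (fun t => pvA_verse ((s + t : Nat) : Int) a) := by
  intro k
  induction k with
  | zero =>
    intro s vs h
    have : a.drop s = [] := List.drop_eq_nil_of_le (by omega)
    simp [this]
  | succ k ih =>
    intro s vs h
    have hs : s < a.length := by omega
    have hcast : ((s : Int) + 1) = ((s + 1 : Nat) : Int) := by omega
    have hsub : (s + 1) - 1 = s := by omega
    rw [List.drop_eq_getElem_cons hs, PySem.List.enumerate_cons, List.foldl_cons,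
      pvStep_eq a s hs vs, hcast]
    have hrec := ih (s + 1) (vs ++ [pvA_verse (s : Int) a]) (by omega)
    rw [hsub] at hrec
    rw [hrec, List.append_assoc, List.range_succ_eq_map, List.map_cons, List.map_map]
    congr 1
    simp only [Nat.add_zero, List.singleton_append]
    congr 1
    apply List.map_congr_left
    intro t _
    simp only [Function.comp]
    congr 2
    omega

-- A's verse list (map over enumerate) in range form
theorem pvA_verses_eq (a : List (List Char × List Char)) :
    (PySem.List.enumerate a 0).map (fun p => pvA_verse p.1 a)
      = (List.range a.length).map (fun t => pvA_verse ((t : Nat) : Int) a) := by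
  rw [PySem.List.enumerate_eq_map_pyRange a ([], []), List.map_map, PySem.List.pyRange_one]
  simp only [PySem.List.len_eq, List.map_map]
  have : ((a.length : Int) - 0).toNat = a.length := by omega
  rw [this]
  apply List.map_congr_left
  intro t _
  simp [Function.comp]

-- ===== VERDICT (by name: the statement is the Claim_ definition above) =====
theorem generate_song_spec : Claim_equal_generate_song := by
  intro animals _
  unfold Spec_generate_song generate_song generate_song_alt
  dsimp only
  set a := animals.map (fun p => (p.1.toList, p.2.toList)) with ha
  have hfold := pvFold_eq a a.length 0 [] (by omega)
  simp only [Nat.zero_sub, pvChain_zero, List.drop_zero, Nat.cast_zero, Nat.zero_add,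
    List.nil_append] at hfold
  rw [pvA_verses_eq, ← hfold]
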